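-- pv_equiv track=rewrite | github.com/cipual/conrft-r1lite | examples/debug/r1lite_reach_target/consistance/debug_compare_eef_replay_r1lite.py | _split_trajectories
-- ===== SOURCE A (Python) =====
-- from typing import Dict, List
--
-- def _split_trajectories(transitions: List[Dict]) -> List[List[Dict]]:
--     trajectories: List[List[Dict]] = []
--     current: List[Dict] = []
--     for transition in transitions:
--         current.append(transition)
--         if bool(transition.get("dones", False)):
--             trajectories.append(current)
--             current = []
--     if current:
--         trajectories.append(current)
--     return trajectories
-- ===== SOURCE B (Python) =====
-- def _split_trajectories(transitions):
--     bounds = [i for i, t in enumerate(transitions) if bool(t.get("dones", False))]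
--     out = []
--     start = 0
--     for i in bounds:
--         out.append(transitions[start:i + 1])
--         start = i + 1
--     if start < len(transitions):
--         out.append(transitions[start:])
--     return out
-- ===== Notes on version B (the rewrite author's own statement) =====
-- stated objective: alternative
-- what changed: B first collects the boundary indices where 'dones' is truthy, then builds each trajectory by slicing the input between consecutive boundaries (plus the trailing remainder), instead of A's single pass that accumulates a growing 'current' list element by element.
import Mathlib
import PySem

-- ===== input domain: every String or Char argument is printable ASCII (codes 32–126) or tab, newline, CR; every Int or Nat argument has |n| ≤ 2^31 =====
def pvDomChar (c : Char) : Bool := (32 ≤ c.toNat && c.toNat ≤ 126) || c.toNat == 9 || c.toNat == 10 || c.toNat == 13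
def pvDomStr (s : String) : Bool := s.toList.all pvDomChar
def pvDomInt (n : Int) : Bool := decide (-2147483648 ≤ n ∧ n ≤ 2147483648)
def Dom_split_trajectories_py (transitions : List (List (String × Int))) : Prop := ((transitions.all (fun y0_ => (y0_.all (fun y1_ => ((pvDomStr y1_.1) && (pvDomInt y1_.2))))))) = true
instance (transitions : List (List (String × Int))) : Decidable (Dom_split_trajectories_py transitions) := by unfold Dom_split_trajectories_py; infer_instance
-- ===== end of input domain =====

-- B replaces A's element-by-element accumulation with a boundary-index pass followed by slicing: an alternative decomposition of the same O(n) task.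

-- bool(transition.get("dones", False)): dict lookup = first match in the association list; truthy iff the int value is nonzero
def pvDones (t : List (String × Int)) : Bool :=
  match t.find? (fun p => p.1 == "dones") with
  | some p => p.2 != 0
  | none => false

-- ===== PORT A =====
def split_trajectories_py (transitions : List (List (String × Int))) : List (List (List (String × Int))) :=
  let st := transitions.foldl
    (fun (st : List (List (List (String × Int))) × List (List (String × Int))) t =>
      let cur := st.2 ++ [t]
      if pvDones t then (st.1 ++ [cur], []) else (st.1, cur))
    ([], [])
  if st.2.isEmpty then st.1 else st.1 ++ [st.2]

-- ===== PORT B =====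
def split_trajectories_py_alt (transitions : List (List (String × Int))) : List (List (List (String × Int))) :=
  let bounds := ((PySem.List.enumerate transitions 0).filter (fun p => pvDones p.2)).map (·.1)
  let st := bounds.foldl
    (fun (st : List (List (List (String × Int))) × Int) i =>
      (st.1 ++ [PySem.List.slice transitions (some st.2) (some (i + 1))], i + 1))
    ([], 0)
  if st.2 < (transitions.length : Int) then
    st.1 ++ [PySem.List.slice transitions (some st.2) none]
  else st.1

-- ===== PRECONDITION & SPEC =====
def Spec_split_trajectories_py (transitions : List (List (String × Int))) (out : List (List (List (String × Int)))) : Prop := out = split_trajectories_py_alt transitions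
instance (transitions : List (List (String × Int))) (out : List (List (List (String × Int)))) : Decidable (Spec_split_trajectories_py transitions out) := by unfold Spec_split_trajectories_py; infer_instance

-- ===== CLAIM (what is proved, stated in full; the proofs are below) =====
def Claim_equal_split_trajectories_py : Prop := ∀ (transitions : List (List (String × Int))), Dom_split_trajectories_py transitions → Spec_split_trajectories_py transitions (split_trajectories_py transitions)

-- ===== LEMMAS AND PROOFS =====

-- the split written as structural recursion on the list: the common reference both ports are reduced to
def pvGo (cur : List (List (String × Int))) : List (List (String × Int)) → List (List (List (String × Int)))
  | [] => if cur.isEmpty then [] else [cur]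
  | t :: rest => if pvDones t then (cur ++ [t]) :: pvGo [] rest else pvGo (cur ++ [t]) rest

lemma pvA_loop (ts : List (List (String × Int)))
    (trajs : List (List (List (String × Int)))) (cur : List (List (String × Int))) :
    (let st := ts.foldl
        (fun (st : List (List (List (String × Int))) × List (List (String × Int))) t =>
          let cur := st.2 ++ [t]
          if pvDones t then (st.1 ++ [cur], []) else (st.1, cur))
        (trajs, cur)
     if st.2.isEmpty then st.1 else st.1 ++ [st.2]) = trajs ++ pvGo cur ts := by
  induction ts generalizing trajs cur with
  | nil =>
    simp only [List.foldl_nil, pvGo]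
    by_cases h : cur.isEmpty <;> simp [h]
  | cons t rest ih =>
    simp only [List.foldl_cons, pvGo]
    by_cases h : pvDones t
    · simp only [h, if_pos]
      rw [ih]
      simp
    · simp only [h, Bool.false_eq_true, if_neg, not_false_iff]
      rw [ih]

lemma pvA_eq (ts : List (List (String × Int))) : split_trajectories_py ts = pvGo [] ts := by
  simpa [split_trajectories_py] using pvA_loop ts [] []

-- B's boundary loop: with the input split as pre ++ mid ++ tail (start pointer = |pre|,
-- pending chunk = mid, boundaries still to process = the truthy indices of tail), the
-- finished result is out ++ pvGo mid tail.
lemma pvB_loop (tail : List (List (String × Int))) :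
    ∀ (pre mid : List (List (String × Int))) (out : List (List (List (String × Int)))),
    (if (((((PySem.List.enumerate tail ((pre.length : Int) + (mid.length : Int))).filter
            (fun p => pvDones p.2)).map (·.1)).foldl
        (fun (st : List (List (List (String × Int))) × Int) i =>
          (st.1 ++ [PySem.List.slice (pre ++ mid ++ tail) (some st.2) (some (i + 1))], i + 1))
        (out, (pre.length : Int))).2 < ((pre ++ mid ++ tail).length : Int)) then
       ((((PySem.List.enumerate tail ((pre.length : Int) + (mid.length : Int))).filter
            (fun p => pvDones p.2)).map (·.1)).foldl
        (fun (st : List (List (List (String × Int))) × Int) i =>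
          (st.1 ++ [PySem.List.slice (pre ++ mid ++ tail) (some st.2) (some (i + 1))], i + 1))
        (out, (pre.length : Int))).1 ++
        [PySem.List.slice (pre ++ mid ++ tail)
          (some ((((PySem.List.enumerate tail ((pre.length : Int) + (mid.length : Int))).filter
            (fun p => pvDones p.2)).map (·.1)).foldl
        (fun (st : List (List (List (String × Int))) × Int) i =>
          (st.1 ++ [PySem.List.slice (pre ++ mid ++ tail) (some st.2) (some (i + 1))], i + 1))
        (out, (pre.length : Int))).2) none]
     else ((((PySem.List.enumerate tail ((pre.length : Int) + (mid.length : Int))).filter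
            (fun p => pvDones p.2)).map (·.1)).foldl
        (fun (st : List (List (List (String × Int))) × Int) i =>
          (st.1 ++ [PySem.List.slice (pre ++ mid ++ tail) (some st.2) (some (i + 1))], i + 1))
        (out, (pre.length : Int))).1) = out ++ pvGo mid tail := by
  induction tail with
  | nil =>
    intro pre mid out
    simp only [PySem.List.enumerate_nil, List.filter_nil, List.map_nil, List.foldl_nil, pvGo]
    by_cases h : mid.isEmpty
    · have : mid = [] := by simpa [List.isEmpty_iff] using h
      subst this; simp
    · have hmid : mid ≠ [] := by simpa [List.isEmpty_iff] using h
      have hlen : 0 < mid.length := List.length_pos_iff.mpr hmid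
      have hy : ((pre.length : Int)) < ((pre ++ mid ++ []).length : Int) := by simp; omega
      rw [if_pos hy]
      have hslice : PySem.List.slice (pre ++ mid ++ []) (some (pre.length : Int)) none = mid := by
        rw [PySem.List.slice_from_natCast]; simp
      rw [hslice]; simp [h]
  | cons t rest ih =>
    intro pre mid out
    rw [PySem.List.enumerate_cons]
    by_cases h : pvDones t
    · have hslice : PySem.List.slice (pre ++ mid ++ t :: rest) (some (pre.length : Int))
          (some ((pre.length : Int) + (mid.length : Int) + 1)) = mid ++ [t] := by
        have hc : ((pre.length : Int) + (mid.length : Int) + 1) = (((pre.length + mid.length + 1 : Nat) : Int)) := by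
          push_cast; ring
        rw [hc, PySem.List.slice_natCast, List.append_assoc, List.drop_left]
        rw [show pre.length + mid.length + 1 - pre.length = mid.length + 1 from by omega]
        rw [List.take_append]
        simp
      simp only [List.filter_cons, h, if_pos, List.map_cons, List.foldl_cons, pvGo, hslice]
      have H := ih (pre ++ mid ++ [t]) [] (out ++ [mid ++ [t]])
      simp only [List.append_assoc, List.append_nil, List.length_append,
        List.length_cons, List.length_nil, List.singleton_append] at H ⊢
      push_cast at H ⊢
      convert H using 3
    · simp only [List.filter_cons, h, Bool.false_eq_true, if_neg, not_false_iff, pvGo]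
      have H := ih pre (mid ++ [t]) out
      simp only [List.append_assoc, List.length_append, List.length_cons, List.length_nil,
        List.singleton_append] at H ⊢
      push_cast at H ⊢
      convert H using 3

lemma pvB_eq (ts : List (List (String × Int))) : split_trajectories_py_alt ts = pvGo [] ts := by
  simpa [split_trajectories_py_alt] using pvB_loop ts [] [] []

-- ===== VERDICT (by name: the statement is the Claim_ definition above) =====
theorem split_trajectories_py_spec : Claim_equal_split_trajectories_py := by
  intro ts _
  unfold Spec_split_trajectories_py
  rw [pvA_eq, pvB_eq]
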